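-- pv_equiv track=rewrite | github.com/cms02snu/Algorithm | baekjoon/2143.py | solution
-- ===== SOURCE A (Python) =====
-- def sub(n,data):
--     temp = [0] * n
--     for i in range(n):
--         if i==0:
--             temp[0] = data[0]
--         else:
--             temp[i] = temp[i-1] + data[i]
--
--     result = [[0]*n for _ in range(n)]
--
--     for j in range(n):
--         for i in range(j+1):
--             if i==0:
--                 result[0][j] = temp[j]
--             else:
--                 result[i][j] = temp[j] - temp[i-1]
--
--     return result
--
-- def solution(target,A,B,n,m):
--     _sumA = sub(n,A)
--     _sumB = sub(m,B)
--
--     dbA = {}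
--     dbB = {}
--
--     for j in range(n):
--         for i in range(j+1):
--             k = _sumA[i][j]
--             if k in dbA:
--                 dbA[k] += 1
--             else:
--                 dbA[k] = 1
--
--     for j in range(m):
--         for i in range(j+1):
--             k = _sumB[i][j]
--             if k in dbB:
--                 dbB[k] += 1
--             else:
--                 dbB[k] = 1
--
--     count = 0
--
--     for a in dbA:
--         if target-a in dbB:
--             count += dbA[a] * dbB[target-a]
--
--     return count
-- ===== SOURCE B (Python) =====
-- def solution(target, A, B, n, m):
--     def counts(k, data):
--         db = {}
--         for i in range(k):
--             s = 0
--             for j in range(i, k):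
--                 s += data[j]
--                 db[s] = db.get(s, 0) + 1
--         return db
--
--     dbA = counts(n, A)
--     dbB = counts(m, B)
--     return sum(c * dbB.get(target - a, 0) for a, c in dbA.items())
-- ===== Notes on version B (the rewrite author's own statement) =====
-- stated objective: simpler
-- what changed: B drops A's prefix-sum array and n-by-n subarray-sum matrix entirely: for each start index it keeps one running sum and increments a counter dict directly, then sums dbA[a]*dbB.get(target-a,0) over dbA's items.
import Mathlib
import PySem

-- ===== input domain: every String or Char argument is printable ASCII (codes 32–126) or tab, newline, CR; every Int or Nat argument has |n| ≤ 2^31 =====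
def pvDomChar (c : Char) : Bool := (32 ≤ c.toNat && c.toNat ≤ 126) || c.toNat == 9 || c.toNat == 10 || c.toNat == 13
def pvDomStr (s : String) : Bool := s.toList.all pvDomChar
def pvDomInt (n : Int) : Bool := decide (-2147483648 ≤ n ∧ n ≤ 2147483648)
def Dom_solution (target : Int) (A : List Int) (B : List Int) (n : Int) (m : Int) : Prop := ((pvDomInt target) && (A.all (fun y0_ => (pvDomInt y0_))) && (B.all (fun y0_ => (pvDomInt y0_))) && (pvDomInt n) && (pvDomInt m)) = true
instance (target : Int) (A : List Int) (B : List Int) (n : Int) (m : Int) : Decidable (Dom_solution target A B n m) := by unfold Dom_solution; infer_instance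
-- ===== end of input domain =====

-- B drops A's prefix-sum array and n×n subarray-sum matrix: per start index it keeps one
-- running sum and a counter dict (objective: simpler, same O(n²+m²) work, no matrix).

-- ===== PORT A =====
-- helper `sub` of A: prefix sums, then the n×n matrix of subarray sums
def pySub (n : Int) (data : List Int) : List (List Int) :=
  let temp := (PySem.List.pyRange 0 n 1).foldl
    (fun temp i =>
      if i = 0 then temp.set 0 (PySem.List.pyGetD data 0 0)
      else temp.set i.toNat (PySem.List.pyGetD temp (i - 1) 0 + PySem.List.pyGetD data i 0))
    (List.replicate n.toNat 0)
  (PySem.List.pyRange 0 n 1).foldl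
    (fun result j =>
      (PySem.List.pyRange 0 (j + 1) 1).foldl
        (fun result i =>
          if i = 0 then
            result.modify 0 (fun row => row.set j.toNat (PySem.List.pyGetD temp j 0))
          else
            result.modify i.toNat (fun row =>
              row.set j.toNat (PySem.List.pyGetD temp j 0 - PySem.List.pyGetD temp (i - 1) 0)))
        result)
    (List.replicate n.toNat (List.replicate n.toNat 0))

-- A's dict-filling double loop over the matrix (the same code is run for A and for B)
def pyBuildDb (n : Int) (mat : List (List Int)) : PySem.Dict Int Int :=
  (PySem.List.pyRange 0 n 1).foldl
    (fun db j =>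
      (PySem.List.pyRange 0 (j + 1) 1).foldl
        (fun db i =>
          let k := PySem.List.pyGetD (PySem.List.pyGetD mat i []) j 0
          if db.contains k then db.insert k (db.getD k 0 + 1) else db.insert k 1)
        db)
    PySem.Dict.empty

def solution (target : Int) (A : List Int) (B : List Int) (n : Int) (m : Int) : Int :=
  let _sumA := pySub n A
  let _sumB := pySub m B
  let dbA := pyBuildDb n _sumA
  let dbB := pyBuildDb m _sumB
  dbA.keys.foldl
    (fun count a =>
      if dbB.contains (target - a) then count + dbA.getD a 0 * dbB.getD (target - a) 0
      else count)
    0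

-- ===== PORT B =====
-- B's helper `counts`: running sum per start index, counted directly into a dict
def countsAlt (k : Int) (data : List Int) : PySem.Dict Int Int :=
  (PySem.List.pyRange 0 k 1).foldl
    (fun db i =>
      ((PySem.List.pyRange i k 1).foldl
        (fun (p : Int × PySem.Dict Int Int) j =>
          let s := p.1 + PySem.List.pyGetD data j 0
          (s, p.2.insert s (p.2.getD s 0 + 1)))
        ((0 : Int), db)).2)
    PySem.Dict.empty

def solution_alt (target : Int) (A : List Int) (B : List Int) (n : Int) (m : Int) : Int :=
  let dbA := countsAlt n A
  let dbB := countsAlt m B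
  (dbA.items.map (fun p => p.2 * dbB.getD (target - p.1) 0)).sum

-- ===== PRECONDITION & SPEC =====
-- Pre_ excludes exactly the inputs where Python A raises IndexError: it reads data[0..n-1]
-- of A and data[0..m-1] of B, so it needs n ≤ len(A) and m ≤ len(B).
def Pre_solution (target : Int) (A : List Int) (B : List Int) (n : Int) (m : Int) : Prop :=
  n ≤ (A.length : Int) ∧ m ≤ (B.length : Int)
instance (target : Int) (A : List Int) (B : List Int) (n : Int) (m : Int) : Decidable (Pre_solution target A B n m) := by unfold Pre_solution; infer_instance

def pvWitness_solution : Int × List Int × List Int × Int × Int := (3, [1, 2], [3], 2, 1)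

def Spec_solution (target : Int) (A : List Int) (B : List Int) (n : Int) (m : Int) (out : Int) : Prop := out = solution_alt target A B n m
instance (target : Int) (A : List Int) (B : List Int) (n : Int) (m : Int) (out : Int) : Decidable (Spec_solution target A B n m out) := by unfold Spec_solution; infer_instance

-- ===== CLAIM (what is proved, stated in full; the proofs are below) =====
def Claim_equal_solution : Prop := ∀ (target : Int) (A : List Int) (B : List Int) (n : Int) (m : Int), Dom_solution target A B n m → Pre_solution target A B n m → Spec_solution target A B n m (solution target A B n m)

-- ===== LEMMAS AND PROOFS =====

-- value of data[t] as both ports read it (index in range under Pre_, default 0 otherwise)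
def pvv (d : List Int) (t : Nat) : Int := d.getD t 0

-- prefix sum of the first k entries
def pvPref (d : List Int) : Nat → Int
  | 0 => 0
  | k + 1 => pvPref d k + pvv d k

-- sum of the subarray d[i..j]
def pvS (d : List Int) (i j : Nat) : Int := pvPref d (j + 1) - pvPref d i

-- the multiset of subarray sums in A's traversal order (column-major over the triangle)
def pvLA (d : List Int) (N : Nat) : List Int :=
  (List.range N).flatMap (fun j => (List.range (j + 1)).map (fun i => pvS d i j))

-- the multiset of subarray sums in B's traversal order (row-major over the triangle)
def pvLB (d : List Int) (N : Nat) : List Int :=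
  (List.range N).flatMap (fun i => (List.range (N - i)).map (fun t => pvS d i (i + t)))

-- A's matrix, in closed form
def pvMat (d : List Int) (N : Nat) : List (List Int) :=
  (List.range N).map (fun i => (List.range N).map (fun j => if i ≤ j ∧ j < N then pvS d i j else 0))

lemma map_range_set {α : Type} (f : Nat → α) (N s : Nat) (v : α) (hs : s < N) :
    ((List.range N).map f).set s v = (List.range N).map (fun j => if j = s then v else f j) := by
  apply List.ext_getElem?
  intro j
  by_cases hj : j < N
  · rw [List.getElem?_set]
    simp only [List.length_map, List.length_range, hj, if_true, List.getElem?_map,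
      List.getElem?_range]
    by_cases hjs : j = s <;> simp [hjs, hs, hj, Ne.symm]
  · simp [hj]

lemma map_range_modify {α : Type} (f : Nat → α) (N u : Nat) (g : α → α) (hu : u < N) :
    ((List.range N).map f).modify u g = (List.range N).map (fun i => if i = u then g (f u) else f i) := by
  apply List.ext_getElem?
  intro j
  rw [List.getElem?_modify]
  by_cases hj : j < N
  · simp only [List.getElem?_map, List.getElem?_range, hj, if_true]
    by_cases hjs : j = u <;> simp [hjs, Option.map, Ne.symm]
  · simp [hj]

lemma fold_setcol (v : Nat → Int) (f : Nat → Nat → Int) (N s : Nat) (hs : s < N) : ∀ u, u ≤ N →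
    (List.range u).foldl (fun res i => res.modify i (fun row => row.set s (v i)))
        ((List.range N).map (fun i => (List.range N).map (f i)))
    = (List.range N).map (fun i => (List.range N).map (fun j =>
        if j = s ∧ i < u then v i else f i j)) := by
  intro u
  induction u with
  | zero => intro _; simp
  | succ t ih =>
    intro ht
    rw [List.range_succ, List.foldl_append, ih (by omega)]
    simp only [List.foldl_cons, List.foldl_nil]
    rw [map_range_modify _ N t _ (by omega)]
    apply List.map_congr_left
    intro i hi
    simp only [List.mem_range] at hi
    by_cases hit : i = t
    · subst hit
      simp only [if_pos rfl]
      rw [map_range_set _ N s _ hs]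
      apply List.map_congr_left
      intro j hj
      by_cases hjs : j = s <;> simp [hjs] <;> omega
    · rw [if_neg hit]
      apply List.map_congr_left
      intro j hj
      by_cases hjs : j = s
      · subst hjs
        by_cases hiu : i < t <;> simp [hiu] <;> omega
      · simp [hjs]

lemma tempRead (d : List Int) (N k : Nat) (hk : k < N) :
    PySem.List.pyGetD ((List.range N).map (fun j => pvPref d (j + 1))) (k : Int) 0
    = pvPref d (k + 1) := by
  rw [PySem.List.pyGetD_of_nonneg _ _ (by omega)]
  simp [List.getD_eq_getElem?_getD, hk]

lemma outer_char (d : List Int) (N : Nat)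
    (temp : List Int) (htemp : temp = (List.range N).map (fun j => pvPref d (j + 1))) :
    ∀ t, t ≤ N →
    (List.range t).foldl
      (fun result (j : Nat) =>
        (PySem.List.pyRange 0 ((j : Int) + 1) 1).foldl
          (fun result (i : Int) =>
            if i = 0 then
              result.modify 0 (fun row => row.set ((j : Int)).toNat (PySem.List.pyGetD temp (j : Int) 0))
            else
              result.modify i.toNat (fun row =>
                row.set ((j : Int)).toNat
                  (PySem.List.pyGetD temp (j : Int) 0 - PySem.List.pyGetD temp (i - 1) 0)))
          result)
      ((List.range N).map (fun i => (List.range N).map (fun j => if i ≤ j ∧ j < 0 then pvS d i j else 0)))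
    = (List.range N).map (fun i => (List.range N).map (fun j => if i ≤ j ∧ j < t then pvS d i j else 0)) := by
  intro t
  induction t with
  | zero => intro _; rfl
  | succ s ih =>
    intro hs
    rw [List.range_succ, List.foldl_append, ih (by omega)]
    simp only [List.foldl_cons, List.foldl_nil]
    -- the column-s inner loop
    rw [PySem.List.pyRange_one]
    have hcnt : (((s : Int) + 1 - 0)).toNat = s + 1 := by omega
    rw [hcnt, List.foldl_map]
    rw [PySem.List.foldl_congr_mem _ _
        (fun res (i : Nat) => res.modify i (fun row => row.set s (pvS d i s))) _ ?_]
    · rw [fold_setcol _ _ N s (by omega) (s+1) (by omega)]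
      apply List.map_congr_left
      intro i hi
      apply List.map_congr_left
      intro j hj
      simp only [List.mem_range] at hi hj
      by_cases hjs : j = s
      · rw [hjs]
        by_cases his : i ≤ s
        · rw [if_pos (by omega), if_pos (by omega)]
        · rw [if_neg (by omega), if_neg (by omega), if_neg (by omega)]
      · rw [if_neg (show ¬(j = s ∧ i < s + 1) by omega)]
        by_cases hc : i ≤ j ∧ j < s
        · rw [if_pos hc, if_pos (by omega)]
        · rw [if_neg hc, if_neg (by omega)]
    · intro acc i hi
      simp only [List.mem_range] at hi
      have hjt : ((s : Int)).toNat = s := by omega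
      match i with
      | 0 =>
        simp only [Nat.cast_zero, zero_add, if_pos rfl, hjt]
        rw [htemp, tempRead d N s (by omega)]
        have h0 : pvS d 0 s = pvPref d (s + 1) := by simp [pvS, pvPref]
        rw [h0]
        simp
      | u + 1 =>
        have hne : ((0 : Int) + ((u + 1 : Nat) : Int)) ≠ 0 := by omega
        rw [if_neg hne]
        have h1 : (0 : Int) + ((u + 1 : Nat) : Int) - 1 = ((u : Nat) : Int) := by push_cast; ring
        have h2 : ((0 : Int) + ((u + 1 : Nat) : Int)).toNat = u + 1 := by omega
        rw [h1, h2, hjt, htemp, tempRead d N s (by omega), tempRead d N u (by omega)]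
        rfl

lemma temp_char (d : List Int) (N : Nat) : ∀ t, t ≤ N →
    (List.range t).foldl
      (fun temp (k : Nat) =>
        if (k : Int) = 0 then temp.set 0 (PySem.List.pyGetD d 0 0)
        else temp.set ((k : Int)).toNat
          (PySem.List.pyGetD temp ((k : Int) - 1) 0 + PySem.List.pyGetD d (k : Int) 0))
      (List.replicate N 0)
    = (List.range t).map (fun j => pvPref d (j + 1)) ++ List.replicate (N - t) 0 := by
  intro t
  induction t with
  | zero => intro _; simp
  | succ s ih =>
    intro hs
    rw [List.range_succ, List.foldl_append, ih (by omega)]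
    simp only [List.foldl_cons, List.foldl_nil]
    match s with
    | 0 =>
      obtain ⟨K, rfl⟩ : ∃ K, N = K + 1 := ⟨N - 1, by omega⟩
      simp [List.replicate_succ, PySem.List.pyGetD_of_nonneg, pvPref, pvv, List.range_succ]
    | u + 1 =>
      have hne : ((u+1 : Nat) : Int) ≠ 0 := by omega
      rw [if_neg hne]
      have h1 : (((u+1 : Nat) : Int)) - 1 = ((u : Nat) : Int) := by push_cast; ring
      rw [h1, PySem.List.pyGetD_of_nonneg _ _ (by omega), PySem.List.pyGetD_of_nonneg _ _ (by omega)]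
      have h2 : ((u:Int)).toNat = u := by omega
      have h3 : (((u+1:Nat):Int)).toNat = u + 1 := by omega
      rw [h2, h3]
      have hlen : (List.map (fun j => pvPref d (j + 1)) (List.range (u+1))).length = u + 1 := by simp
      have hget : (List.map (fun j => pvPref d (j + 1)) (List.range (u+1)) ++ List.replicate (N - (u+1)) 0).getD u 0 = pvPref d (u + 1) := by
        rw [List.getD_append _ _ _ _ (by simp)]
        simp [List.getD_eq_getElem?_getD]
      rw [hget]
      have hrep : List.replicate (N - (u+1)) (0:Int) = 0 :: List.replicate (N-(u+2)) 0 := by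
        have : N - (u+1) = (N - (u+2)) + 1 := by omega
        rw [this, List.replicate_succ]
      rw [hrep]
      have hset : (List.map (fun j => pvPref d (j + 1)) (List.range (u+1)) ++ 0 :: List.replicate (N-(u+2)) 0).set (u+1) (pvPref d (u+1) + d.getD (u+1) 0)
          = List.map (fun j => pvPref d (j + 1)) (List.range (u+1)) ++ (pvPref d (u+1) + d.getD (u+1) 0) :: List.replicate (N-(u+2)) 0 := by
        rw [List.set_append]
        simp [hlen]
      rw [hset, List.range_succ]
      simp [pvPref, pvv]

lemma pySub_eq (n : Int) (d : List Int) : pySub n d = pvMat d n.toNat := by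
  unfold pvMat
  unfold pySub
  rw [PySem.List.pyRange_one]
  have h0 : (n - 0).toNat = n.toNat := by omega
  rw [h0, List.foldl_map, List.foldl_map]
  simp only [zero_add]
  rw [temp_char d n.toNat n.toNat (le_refl _)]
  have hrepl : (List.range n.toNat).map (fun j => pvPref d (j + 1)) ++ List.replicate (n.toNat - n.toNat) 0
      = (List.range n.toNat).map (fun j => pvPref d (j + 1)) := by simp
  rw [hrepl]
  have hinit : List.replicate n.toNat (List.replicate n.toNat (0:Int))
      = (List.range n.toNat).map (fun i => (List.range n.toNat).map (fun j =>
          if i ≤ j ∧ j < 0 then pvS d i j else 0)) := by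
    simp
  rw [hinit]
  exact outer_char d n.toNat _ rfl n.toNat (le_refl _)

lemma dstep_eq (db : PySem.Dict Int Int) (k : Int) :
    (if db.contains k then db.insert k (db.getD k 0 + 1) else db.insert k 1)
    = db.insert k (db.getD k 0 + 1) := by
  by_cases h : db.contains k
  · simp [h]
  · simp only [Bool.not_eq_true] at h
    simp [h, PySem.Dict.getD_of_not_contains db 0 h]

lemma matRead (d : List Int) (N i j : Nat) (hij : i ≤ j) (hj : j < N) :
    PySem.List.pyGetD (PySem.List.pyGetD (pvMat d N) (i : Int) []) (j : Int) 0 = pvS d i j := by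
  rw [PySem.List.pyGetD_of_nonneg _ _ (by omega), PySem.List.pyGetD_of_nonneg _ _ (by omega)]
  unfold pvMat
  simp only [Int.toNat_natCast]
  simp [List.getD_eq_getElem?_getD, hij, hj, Nat.lt_of_le_of_lt hij hj]

lemma buildDb_counter (n : Int) (d : List Int) :
    pyBuildDb n (pvMat d n.toNat) = PySem.Dict.counter (pvLA d n.toNat) := by
  unfold pyBuildDb
  rw [PySem.List.pyRange_one]
  have h0 : (n - 0).toNat = n.toNat := by omega
  rw [h0, List.foldl_map]
  rw [PySem.List.foldl_congr_mem _ _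
      (fun db (j : Nat) => ((List.range (j + 1)).map (fun i => pvS d i j)).foldl
        (fun db k => db.insert k (db.getD k 0 + 1)) db) _ ?_]
  · rw [← List.foldl_flatMap]
    exact PySem.Dict.foldl_insert_getD_add_one_eq_counter _
  · intro db j hj
    simp only [List.mem_range] at hj
    simp only [zero_add]
    rw [PySem.List.pyRange_one]
    have h1 : (((j : Int) + 1 - 0)).toNat = j + 1 := by omega
    rw [h1, List.foldl_map, List.foldl_map]
    apply PySem.List.foldl_congr_mem
    intro acc i hi
    simp only [List.mem_range] at hi
    simp only [zero_add]
    rw [matRead d n.toNat i j (by omega) hj, dstep_eq]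

lemma innerB_char (d : List Int) (i : Nat) : ∀ (cnt a : Nat) (db : PySem.Dict Int Int),
    ((List.range' a cnt).foldl
      (fun (p : Int × PySem.Dict Int Int) (t : Nat) =>
        (p.1 + PySem.List.pyGetD d ((i + t : Nat) : Int) 0,
         p.2.insert (p.1 + PySem.List.pyGetD d ((i + t : Nat) : Int) 0)
           (p.2.getD (p.1 + PySem.List.pyGetD d ((i + t : Nat) : Int) 0) 0 + 1)))
      (pvPref d (i + a) - pvPref d i, db)).2
    = ((List.range' a cnt).map (fun t => pvS d i (i + t))).foldl
        (fun db x => db.insert x (db.getD x 0 + 1)) db := by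
  intro cnt
  induction cnt with
  | zero => intro a db; simp
  | succ c ih =>
    intro a db
    rw [List.range'_succ, List.foldl_cons, List.map_cons, List.foldl_cons]
    have hv : PySem.List.pyGetD d ((i + a : Nat) : Int) 0 = pvv d (i + a) := by
      rw [PySem.List.pyGetD_of_nonneg _ _ (by omega)]
      have hx : (((i + a : Nat) : Int)).toNat = i + a := by omega
      rw [List.getD_eq_getElem?_getD, hx]
      simp [pvv, List.getD_eq_getElem?_getD]
    have hsum : pvPref d (i + a) - pvPref d i + PySem.List.pyGetD d ((i + a : Nat) : Int) 0
        = pvS d i (i + a) := by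
      rw [hv]
      have : pvPref d (i + a + 1) = pvPref d (i + a) + pvv d (i + a) := rfl
      simp [pvS, this]
      ring
    simp only [hsum]
    have := ih (a + 1) (db.insert (pvS d i (i + a)) (db.getD (pvS d i (i + a)) 0 + 1))
    have harg : i + (a + 1) = i + a + 1 := by omega
    rw [harg] at this
    have hpref : pvPref d (i + a + 1) - pvPref d i = pvS d i (i + a) := rfl
    rw [hpref] at this
    exact this

lemma countsAlt_counter (n : Int) (d : List Int) :
    countsAlt n d = PySem.Dict.counter (pvLB d n.toNat) := by
  unfold countsAlt
  rw [PySem.List.pyRange_one]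
  have h0 : (n - 0).toNat = n.toNat := by omega
  rw [h0, List.foldl_map]
  rw [PySem.List.foldl_congr_mem _ _
      (fun db (i : Nat) => ((List.range (n.toNat - i)).map (fun t => pvS d i (i + t))).foldl
        (fun db x => db.insert x (db.getD x 0 + 1)) db) _ ?_]
  · rw [← List.foldl_flatMap]
    exact PySem.Dict.foldl_insert_getD_add_one_eq_counter _
  · intro db i hi
    simp only [List.mem_range] at hi
    have hn : n = (n.toNat : Int) := by omega
    simp only [zero_add]
    rw [PySem.List.pyRange_one]
    have h1 : ((n - (i : Int))).toNat = n.toNat - i := by omega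
    rw [h1, List.foldl_map]
    have hbody : (fun (p : Int × PySem.Dict Int Int) (t : Nat) =>
          (p.1 + PySem.List.pyGetD d ((i : Int) + (t : Int)) 0,
           p.2.insert (p.1 + PySem.List.pyGetD d ((i : Int) + (t : Int)) 0)
             (p.2.getD (p.1 + PySem.List.pyGetD d ((i : Int) + (t : Int)) 0) 0 + 1)))
        = (fun (p : Int × PySem.Dict Int Int) (t : Nat) =>
          (p.1 + PySem.List.pyGetD d ((i + t : Nat) : Int) 0,
           p.2.insert (p.1 + PySem.List.pyGetD d ((i + t : Nat) : Int) 0)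
             (p.2.getD (p.1 + PySem.List.pyGetD d ((i + t : Nat) : Int) 0) 0 + 1))) := by
      funext p t
      have : ((i : Int) + (t : Int)) = ((i + t : Nat) : Int) := by push_cast; ring
      rw [this]
    rw [hbody]
    have hinit : ((0 : Int), db) = (pvPref d (i + 0) - pvPref d i, db) := by simp
    rw [hinit]
    have := innerB_char d i (n.toNat - i) 0 db
    rw [← List.range_eq_range'] at this
    exact this

lemma buildDb_pySub (n : Int) (d : List Int) :
    pyBuildDb n (pySub n d) = PySem.Dict.counter (pvLA d n.toNat) := by
  rw [pySub_eq]
  exact buildDb_counter n d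

-- counting helpers
lemma count_map_range (f : Nat → Int) (x : Int) : ∀ k,
    (((List.range k).map f).count x) = ∑ i ∈ Finset.range k, (if f i = x then 1 else 0) := by
  intro k
  induction k with
  | zero => simp
  | succ s ih =>
    rw [List.range_succ, List.map_append, List.count_append, ih, Finset.sum_range_succ]
    simp only [List.map_cons, List.map_nil, List.count_cons, List.count_nil, beq_iff_eq]
    by_cases h : f s = x <;> simp [h, eq_comm]

lemma count_flatMap_range (g : Nat → List Int) (x : Int) : ∀ N,
    (((List.range N).flatMap g).count x) = ∑ j ∈ Finset.range N, (g j).count x := by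
  intro N
  induction N with
  | zero => simp
  | succ s ih =>
    rw [List.range_succ, List.flatMap_append, List.count_append, ih, Finset.sum_range_succ]
    simp

-- the triangle sum swap: column-major vs row-major enumeration of {(i,j) | i ≤ j < N}
lemma tri_swap (g : Nat → Nat → Nat) (N : Nat) :
    ∑ j ∈ Finset.range N, ∑ i ∈ Finset.range (j + 1), g i j
    = ∑ i ∈ Finset.range N, ∑ t ∈ Finset.range (N - i), g i (i + t) := by
  have h1 : ∀ j ∈ Finset.range N,
      ∑ i ∈ Finset.range (j + 1), g i j = ∑ i ∈ Finset.range N, if i ≤ j then g i j else 0 := by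
    intro j hj
    simp only [Finset.mem_range] at hj
    calc ∑ i ∈ Finset.range (j + 1), g i j
        = ∑ i ∈ Finset.range (j + 1), (if i ≤ j then g i j else 0) :=
          Finset.sum_congr rfl (fun i hi => by
            simp only [Finset.mem_range] at hi; rw [if_pos (by omega)])
      _ = ∑ i ∈ Finset.range N, (if i ≤ j then g i j else 0) :=
          Finset.sum_subset (fun x hx => by simp only [Finset.mem_range] at hx ⊢; omega) (fun i _ hi => by
            simp only [Finset.mem_range, not_lt] at hi; rw [if_neg (by omega)])
  have h2 : ∀ i ∈ Finset.range N,
      ∑ t ∈ Finset.range (N - i), g i (i + t) = ∑ j ∈ Finset.range N, if i ≤ j then g i j else 0 := by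
    intro i hi
    simp only [Finset.mem_range] at hi
    calc ∑ t ∈ Finset.range (N - i), g i (i + t)
        = ∑ j ∈ Finset.Ico i N, g i j := (Finset.sum_Ico_eq_sum_range (fun j => g i j) i N).symm
      _ = ∑ j ∈ Finset.Ico i N, (if i ≤ j then g i j else 0) :=
          Finset.sum_congr rfl (fun j hj => by
            simp only [Finset.mem_Ico] at hj; rw [if_pos hj.1])
      _ = ∑ j ∈ Finset.range N, (if i ≤ j then g i j else 0) :=
          Finset.sum_subset (fun j hj => by
              simp only [Finset.mem_Ico] at hj
              exact Finset.mem_range.mpr (by omega))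
            (fun j hj1 hj2 => by
              simp only [Finset.mem_range] at hj1
              simp only [Finset.mem_Ico, not_and, not_lt] at hj2
              rw [if_neg (by intro hij; have := hj2 hij; omega)])
  calc ∑ j ∈ Finset.range N, ∑ i ∈ Finset.range (j + 1), g i j
      = ∑ j ∈ Finset.range N, ∑ i ∈ Finset.range N, (if i ≤ j then g i j else 0) :=
        Finset.sum_congr rfl h1
    _ = ∑ i ∈ Finset.range N, ∑ j ∈ Finset.range N, (if i ≤ j then g i j else 0) :=
        Finset.sum_comm
    _ = ∑ i ∈ Finset.range N, ∑ t ∈ Finset.range (N - i), g i (i + t) :=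
        (Finset.sum_congr rfl h2).symm

lemma count_LA_LB (d : List Int) (N : Nat) (x : Int) :
    (pvLA d N).count x = (pvLB d N).count x := by
  unfold pvLA pvLB
  rw [count_flatMap_range, count_flatMap_range]
  simp only [count_map_range]
  exact tri_swap (fun i j => if pvS d i j = x then 1 else 0) N

lemma perm_LA_LB (d : List Int) (N : Nat) : (pvLA d N).Perm (pvLB d N) :=
  List.perm_iff_count.2 (fun x => count_LA_LB d N x)

-- A's final loop over the counter, as a sum over the distinct subarray sums
lemma finalA (L M : List Int) (target : Int) :
    (PySem.Dict.counter L).keys.foldl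
      (fun count a =>
        if (PySem.Dict.counter M).contains (target - a) then
          count + (PySem.Dict.counter L).getD a 0 * (PySem.Dict.counter M).getD (target - a) 0
        else count) 0
    = ((PySem.Set.ofList L).map
        (fun a => (L.count a : Int) * (M.count (target - a) : Int))).sum := by
  rw [PySem.Dict.keys_counter]
  rw [PySem.List.foldl_congr_mem _ _
      (fun count a => count + (L.count a : Int) * (M.count (target - a) : Int)) _ ?_]
  · rw [PySem.List.foldl_add, zero_add]
  · intro acc a _
    by_cases h : (PySem.Dict.counter M).contains (target - a)
    · simp [h, PySem.Dict.getD_counter]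
    · simp only [Bool.not_eq_true] at h
      rw [PySem.Dict.contains_counter] at h
      have : M.count (target - a) = 0 := List.count_eq_zero.2 (by simpa using h)
      simp [h, this]

-- B's items sum over the counter, in the same canonical form
lemma finalB (L M : List Int) (target : Int) :
    ((PySem.Dict.counter L).items.map
        (fun p => p.2 * (PySem.Dict.counter M).getD (target - p.1) 0)).sum
    = ((PySem.Set.ofList L).map
        (fun a => (L.count a : Int) * (M.count (target - a) : Int))).sum := by
  rw [PySem.Dict.items_counter, List.map_map]
  simp only [Function.comp_def, PySem.Dict.getD_counter]

-- ===== VERDICT (by name: the statement is the Claim_ definition above) =====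
theorem solution_spec : Claim_equal_solution := by
  intro target A B n m _ _
  unfold Spec_solution solution solution_alt
  simp only []
  rw [buildDb_pySub n A, buildDb_pySub m B, countsAlt_counter n A, countsAlt_counter m B,
    finalA, finalB]
  have hA : ∀ a : Int, ((pvLA A n.toNat).count a : Int) = ((pvLB A n.toNat).count a : Int) := by
    intro a; rw [count_LA_LB]
  have hB : ∀ a : Int, ((pvLA B m.toNat).count a : Int) = ((pvLB B m.toNat).count a : Int) := by
    intro a; rw [count_LA_LB]
  have hfun : (fun a => ((pvLA A n.toNat).count a : Int) * ((pvLA B m.toNat).count (target - a) : Int))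
      = (fun a => ((pvLB A n.toNat).count a : Int) * ((pvLB B m.toNat).count (target - a) : Int)) := by
    funext a; rw [hA, hB]
  rw [hfun]
  have hperm : (PySem.Set.ofList (pvLA A n.toNat)).Perm (PySem.Set.ofList (pvLB A n.toNat)) := by
    rw [List.perm_ext_iff_of_nodup (PySem.Set.nodup_ofList _) (PySem.Set.nodup_ofList _)]
    intro a
    rw [PySem.Set.mem_ofList, PySem.Set.mem_ofList]
    exact (perm_LA_LB A n.toNat).mem_iff
  exact (hperm.map _).sum_eq
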